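-- pv_equiv track=rewrite | github.com/moniarul/FetchRewards | test_app.py | is_pyramid
-- ===== SOURCE A (Python) =====
-- def is_pyramid(word):
--     char_map = {}
--     for ch in word:
--         if ch in char_map:
--             char_map[ch] += 1
--         else:
--             char_map[ch] = 1
--
--     sorted_items = sorted(char_map.items(), key=lambda x: x[1])
--
--     for i, item in enumerate(sorted_items):
--         if item[1] != i + 1:
--             return False
--
--     return True
-- ===== SOURCE B (Python) =====
-- def is_pyramid(word):
--     counts = {}
--     for ch in word:
--         counts[ch] = counts.get(ch, 0) + 1
--     vals = list(counts.values())
--     if not vals: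
--         return True
--     return len(set(vals)) == len(vals) and max(vals) == len(vals)
-- ===== Notes on version B (the rewrite author's own statement) =====
-- stated objective: simpler
-- what changed: Replaces the sort of (char,count) pairs and the indexed enumerate loop with a direct characterisation: the counts form {1,..,k} iff they are pairwise distinct and their maximum equals their number (empty word guarded to True).
import Mathlib
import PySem

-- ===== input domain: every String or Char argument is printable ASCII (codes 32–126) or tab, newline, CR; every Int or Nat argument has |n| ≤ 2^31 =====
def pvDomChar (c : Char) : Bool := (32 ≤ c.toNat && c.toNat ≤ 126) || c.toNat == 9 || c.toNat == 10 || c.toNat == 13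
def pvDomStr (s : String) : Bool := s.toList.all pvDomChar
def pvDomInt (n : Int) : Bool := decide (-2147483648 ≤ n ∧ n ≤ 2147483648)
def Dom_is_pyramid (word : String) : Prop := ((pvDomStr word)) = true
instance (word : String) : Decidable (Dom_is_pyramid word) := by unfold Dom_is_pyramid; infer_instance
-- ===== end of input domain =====

-- B drops A's sort and indexed comparison loop: k distinct positive counts with maximum k are exactly {1,…,k}. Objective: simpler.

-- ===== PORT A =====
def is_pyramid (word : String) : Bool :=
  let char_map : PySem.Dict Char Int :=
    word.toList.foldl
      (fun d ch =>
        if d.contains ch then d.insert ch (d.getD ch 0 + 1)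
        else d.insert ch 1)
      PySem.Dict.empty
  let sorted_items := PySem.List.sorted char_map.items (fun x => x.2)
  (PySem.List.enumerate sorted_items 0).all (fun p => p.2.2 == p.1 + 1)

-- ===== PORT B =====
def is_pyramid_alt (word : String) : Bool :=
  let counts : PySem.Dict Char Int :=
    word.toList.foldl (fun d ch => d.insert ch (d.getD ch 0 + 1)) PySem.Dict.empty
  let vals := counts.values
  if vals = [] then true
  else
    decide ((PySem.Set.ofList vals).length = vals.length) &&
    decide (PySem.List.max? vals (fun x => x) = some (vals.length : Int))

-- ===== PRECONDITION & SPEC =====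
def Spec_is_pyramid (word : String) (out : Bool) : Prop := out = is_pyramid_alt word
instance (word : String) (out : Bool) : Decidable (Spec_is_pyramid word out) := by unfold Spec_is_pyramid; infer_instance

-- ===== CLAIM (what is proved, stated in full; the proofs are below) =====
def Claim_equal_is_pyramid : Prop := ∀ (word : String), Dom_is_pyramid word → Spec_is_pyramid word (is_pyramid word)

-- ===== LEMMAS AND PROOFS =====

-- A's manual counting loop builds Counter(word)
theorem pvDictA_eq_counter (cs : List Char) :
    cs.foldl
      (fun (d : PySem.Dict Char Int) ch =>
        if d.contains ch then d.insert ch (d.getD ch 0 + 1)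
        else d.insert ch 1)
      PySem.Dict.empty = PySem.Dict.counter cs := by
  have hf : (fun (d : PySem.Dict Char Int) ch =>
      if d.contains ch then d.insert ch (d.getD ch 0 + 1)
      else d.insert ch 1)
      = fun d ch => d.insert ch (d.getD ch 0 + 1) := by
    funext d ch
    by_cases h : d.contains ch = true
    · simp [h]
    · have h' : d.contains ch = false := by simp_all
      rw [if_neg (by simp [h']), PySem.Dict.getD_of_not_contains d 0 h']
      norm_num
  rw [hf, PySem.Dict.foldl_insert_getD_add_one_eq_counter]

-- the count of any character occurring in cs is at least 1
theorem pvVals_pos (cs : List Char) :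
    ∀ v ∈ (PySem.Dict.counter cs).values, 1 ≤ v := by
  intro v hv
  have h : (PySem.Dict.counter cs).values
      = (PySem.Set.ofList cs).map (fun k => (cs.count k : Int)) := by
    show ((PySem.Dict.counter cs).items).map (·.2) = _
    rw [PySem.Dict.items_counter]
    simp
  rw [h] at hv
  simp only [List.mem_map] at hv
  obtain ⟨k, hk, rfl⟩ := hv
  have hm : k ∈ cs := (PySem.Set.mem_ofList cs k).mp hk
  have := List.count_pos_iff.mpr hm
  omega

-- len(set(l)) = len(l) iff l has no duplicates
theorem pvOfList_length_iff {α : Type} [BEq α] [LawfulBEq α] [DecidableEq α] (l : List α) :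
    (PySem.Set.ofList l).length = l.length ↔ l.Nodup := by
  have hperm : (PySem.Set.ofList l).Perm l.dedup := by
    refine (List.perm_ext_iff_of_nodup (PySem.Set.nodup_ofList l) l.nodup_dedup).mpr ?_
    intro x; rw [PySem.Set.mem_ofList, List.mem_dedup]
  have hlen : (PySem.Set.ofList l).length = l.dedup.length := hperm.length_eq
  constructor
  · intro h
    have h2 := List.Sublist.eq_of_length l.dedup_sublist (by omega)
    rw [← h2]; exact l.nodup_dedup
  · intro h
    rw [hlen, List.Nodup.dedup h]

-- the target list [1, 2, …, n] as Ints
def pvTarget (n : Nat) : List Int := List.map (fun k : Nat => ((k : Int) + 1)) (List.range n)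

theorem pvTarget_length (n : Nat) : (pvTarget n).length = n := by
  rw [pvTarget, List.length_map, List.length_range]

theorem pvTarget_getElem (n k : Nat) (h : k < (pvTarget n).length) :
    (pvTarget n)[k] = (k : Int) + 1 := by
  simp [pvTarget]

theorem pvMem_target (n : Nat) (v : Int) : v ∈ pvTarget n ↔ 1 ≤ v ∧ v ≤ (n : Int) := by
  rw [pvTarget, List.mem_map]
  constructor
  · rintro ⟨k, hk, rfl⟩
    rw [List.mem_range] at hk
    omega
  · rintro ⟨h1, h2⟩
    refine ⟨(v - 1).toNat, ?_, by omega⟩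
    rw [List.mem_range]; omega

theorem pvTarget_pairwise (n : Nat) : (pvTarget n).Pairwise (· ≤ ·) := by
  rw [pvTarget, List.pairwise_map]
  exact List.pairwise_lt_range.imp (fun h => by omega)

theorem pvTarget_nodup (n : Nat) : (pvTarget n).Nodup := by
  rw [pvTarget]
  exact List.Nodup.map (fun a b h => by omega) List.nodup_range

-- main equivalence, stated over the character list
theorem pv_core (cs : List Char) :
    ((PySem.List.enumerate
        (PySem.List.sorted (PySem.Dict.counter cs).items (fun x => x.2)) 0).all
      (fun p => p.2.2 == p.1 + 1))
    = (if (PySem.Dict.counter cs).values = [] then true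
       else
         decide ((PySem.Set.ofList (PySem.Dict.counter cs).values).length
             = (PySem.Dict.counter cs).values.length) &&
         decide (PySem.List.max? (PySem.Dict.counter cs).values (fun x => x)
             = some ((PySem.Dict.counter cs).values.length : Int))) := by
  set d := PySem.Dict.counter cs with hd
  set vals := d.values with hvals
  set items := d.items with hitems
  have hvi : vals = items.map (·.2) := rfl
  set s := PySem.List.sorted items (fun x => x.2) with hs
  have hsp : (s.map (·.2)).Perm vals := by
    rw [hvi]; exact (PySem.List.sorted_perm items (fun x => x.2) false).map _
  have hlen : (s.map (·.2)).length = vals.length := hsp.length_eq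
  have hslen : s.length = vals.length := by simpa using hlen
  have hpw : (s.map (·.2)).Pairwise (· ≤ ·) := PySem.List.sorted_map_key_pairwise items _
  have hA : ((PySem.List.enumerate s 0).all (fun p => p.2.2 == p.1 + 1) = true)
      ↔ s.map (·.2) = pvTarget vals.length := by
    rw [List.all_eq_true]
    constructor
    · intro h
      refine List.ext_getElem (by rw [hlen, pvTarget_length]) ?_
      intro k h1 h2
      have hk : k < s.length := by simpa using h1
      have h3 := h (0 + (k : Int), s[k]) ((PySem.List.mem_enumerate_iff s 0 _).mpr ⟨k, hk, rfl⟩)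
      simp only [beq_iff_eq] at h3
      rw [List.getElem_map, pvTarget_getElem]
      omega
    · intro h p hp
      obtain ⟨k, hk, rfl⟩ := (PySem.List.mem_enumerate_iff s 0 p).mp hp
      have h1 : k < (s.map (·.2)).length := by simpa using hk
      have h2 := List.getElem_of_eq h h1
      rw [List.getElem_map, pvTarget_getElem] at h2
      simp only [beq_iff_eq]
      omega
  by_cases hn : vals = []
  · have hitems0 : items = [] := by
      have h0 := hvi
      rw [hn] at h0
      exact (List.map_eq_nil_iff.mp h0.symm)
    rw [if_pos hn]
    have hs0 : s = [] := by
      rw [hs]; exact (PySem.List.sorted_eq_nil_iff items _ false).mpr hitems0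
    rw [hs0]
    simp [PySem.List.enumerate]
  · rw [if_neg hn]
    have hpos : ∀ v ∈ vals, 1 ≤ v := by rw [hvals, hd]; exact pvVals_pos cs
    have hn0 : 0 < vals.length := List.length_pos_iff.mpr hn
    rw [Bool.eq_iff_iff, hA, Bool.and_eq_true, decide_eq_true_iff, decide_eq_true_iff,
      pvOfList_length_iff]
    constructor
    · intro h
      have hperm : vals.Perm (pvTarget vals.length) := hsp.symm.trans (by rw [h])
      have hnd : vals.Nodup := hperm.nodup_iff.mpr (pvTarget_nodup _)
      refine ⟨hnd, ?_⟩
      have hmem : ((vals.length : Int)) ∈ vals :=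
        hperm.mem_iff.mpr ((pvMem_target _ _).mpr ⟨by omega, le_refl _⟩)
      have hub : ∀ v ∈ vals, v ≤ (vals.length : Int) := by
        intro v hv
        exact ((pvMem_target _ _).mp (hperm.mem_iff.mp hv)).2
      obtain ⟨m, hm⟩ : ∃ m, PySem.List.max? vals (fun x => x) = some m := by
        cases hmax : PySem.List.max? vals (fun x => x) with
        | none => exact absurd ((PySem.List.max?_eq_none_iff vals _).mp hmax) hn
        | some m => exact ⟨m, rfl⟩
      have h1 := PySem.List.max?_isMax hm _ hmem
      have h2 := hub m (PySem.List.max?_mem hm)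
      rw [hm]; congr 1; omega
    · rintro ⟨hnd, hmax⟩
      have hub : ∀ v ∈ vals, v ≤ (vals.length : Int) := PySem.List.max?_isMax hmax
      have hmem : ((vals.length : Int)) ∈ vals := PySem.List.max?_mem hmax
      have hperm : vals.Perm (pvTarget vals.length) := by
        refine (List.perm_ext_iff_of_nodup hnd (pvTarget_nodup _)).mpr ?_
        intro v
        rw [pvMem_target]
        constructor
        · intro hv; exact ⟨hpos v hv, hub v hv⟩
        · rintro ⟨h1, h2⟩
          by_contra hvv
          have hsub : vals.toFinset ⊆ Finset.Icc (1 : Int) (vals.length : Int) := by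
            intro x hx
            rw [List.mem_toFinset] at hx
            rw [Finset.mem_Icc]
            exact ⟨hpos x hx, hub x hx⟩
          have hcard : vals.toFinset.card = vals.length := List.toFinset_card_of_nodup hnd
          have hicc : (Finset.Icc (1 : Int) (vals.length : Int)).card = vals.length := by
            rw [Int.card_Icc]; omega
          have heq : vals.toFinset = Finset.Icc (1 : Int) (vals.length : Int) :=
            Finset.eq_of_subset_of_card_le hsub (by omega)
          have hvm : v ∈ vals.toFinset := by
            rw [heq, Finset.mem_Icc]; exact ⟨h1, h2⟩
          exact hvv (List.mem_toFinset.mp hvm)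
      exact PySem.List.eq_of_perm_of_pairwise_le_of_injective (fun x => x)
        (fun a b h => h) (hsp.trans hperm) hpw (pvTarget_pairwise _)

-- ===== VERDICT (by name: the statement is the Claim_ definition above) =====
theorem is_pyramid_spec : Claim_equal_is_pyramid := by
  intro word _
  show is_pyramid word = is_pyramid_alt word
  unfold is_pyramid is_pyramid_alt
  simp only [pvDictA_eq_counter, PySem.Dict.foldl_insert_getD_add_one_eq_counter]
  exact pv_core word.toList
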